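-- pv_equiv track=rewrite | github.com/danduma/minerva | models/sklearn1.py | addNGramFeatures
-- ===== SOURCE A (Python) =====
-- def get_token(token_list, index, prop):
--     if index < 0 or index > (len(token_list) - 1):
--         return None
--     else:
--         if prop not in token_list[index]:
--             raise ValueError(prop + " not in token")
--         return token_list[index][prop]
--
-- def addNGramFeatures(tokens, features, ngram_len=3):
--     ngram_len = max(1, ngram_len)
--
--     for index, token in enumerate(tokens):
--         for feature in features:
--             prevs = [get_token(tokens, index - ng_index, feature) for ng_index in range(1, ngram_len + 1, 1)]
--             to_add = {}
--             for ng_index in range(1, ngram_len + 1, 1):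
--                 to_add["prev_" + feature + str(ng_index)] = " ".join([str(x) for x in prevs[-ng_index:]])
--
--             token.update(to_add)
--
--     return tokens
-- ===== SOURCE B (Python) =====
-- def addNGramFeatures(tokens, features, ngram_len=3):
--     # Rolling-window re-implementation: one window of the last ngram_len stringified
--     # feature values per distinct feature, rolled once per token, with the joined
--     # n-gram strings built incrementally (each longer join extends the previous one).
--     # Mutates the token dicts in place and returns the same list, like the original.
--     L = max(1, ngram_len)
--     windows = {f: ["None"] * L for f in features}
--     prev = None
--     for token in tokens:
--         if prev is not None:
--             for f, w in windows.items():
--                 w.insert(0, str(prev[f]))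
--                 w.pop()
--         for f in features:
--             w = windows[f]
--             to_add = {}
--             acc = None
--             for K in range(1, L + 1):
--                 v = w[L - K]
--                 acc = v if acc is None else v + " " + acc
--                 to_add["prev_" + f + str(K)] = acc
--             token.update(to_add)
--         prev = token
--     return tokens
-- ===== Notes on version B (the rewrite author's own statement) =====
-- stated objective: faster
-- what changed: Instead of recomputing, for every token and feature, the whole prevs list via ngram_len get_token index lookups and joining a fresh slice for each K, B keeps one rolling window of the last ngram_len stringified values per distinct feature (rolled once per token from the previous token only) and builds the K-gram strings incrementally, each join extending the previous one.
import Mathlib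
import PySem

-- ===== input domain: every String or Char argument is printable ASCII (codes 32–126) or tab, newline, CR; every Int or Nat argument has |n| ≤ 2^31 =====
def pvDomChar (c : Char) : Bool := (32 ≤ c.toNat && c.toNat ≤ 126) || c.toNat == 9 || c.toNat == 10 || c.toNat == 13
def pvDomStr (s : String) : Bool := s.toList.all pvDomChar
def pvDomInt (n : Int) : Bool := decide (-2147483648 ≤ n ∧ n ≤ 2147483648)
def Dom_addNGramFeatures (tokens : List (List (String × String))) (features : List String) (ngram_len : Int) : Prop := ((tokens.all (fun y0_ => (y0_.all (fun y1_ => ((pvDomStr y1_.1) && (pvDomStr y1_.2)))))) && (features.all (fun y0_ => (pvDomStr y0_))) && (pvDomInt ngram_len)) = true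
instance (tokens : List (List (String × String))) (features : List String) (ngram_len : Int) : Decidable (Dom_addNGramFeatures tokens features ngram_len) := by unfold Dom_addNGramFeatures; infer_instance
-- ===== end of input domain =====

-- B replaces A's per-token-per-feature recomputation of all previous values (and a joined
-- slice per n-gram size) by one rolling window per feature and incremental joins: measured
-- constant-factor speedup. Both Pythons mutate the token dicts in place and return the same
-- list; the equivalence proved here is about the returned value.

-- ===== PORT A =====
-- str(x) for x : Optional[str] — str(None) = "None", str(s) = s
def pvStr (v : Option String) : String :=
  match v with
  | none => "None"
  | some s => s

-- get_token: every call site passes index - d with d ≥ 1, so the position is inside the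
-- already-processed prefix `done`; the upper-bound test agrees with Python's test against the
-- full list length at those call sites.  A missing key is Python's ValueError path (excluded
-- by Pre_); the port returns none there, which pvStr renders like Python's None.
def pvGetTok (done : List (List (String × String))) (i : Int) (prop : String) : Option String :=
  if i < 0 ∨ (done.length : Int) - 1 < i then none
  else
    match PySem.List.pyGet? done i with
    | some t => (PySem.Dict.mk t).get? prop
    | none => none

def addNGramFeatures (tokens : List (List (String × String))) (features : List String) (ngram_len : Int) : List (List (String × String)) :=
  let L := max 1 ngram_len
  tokens.foldl
    (fun done token =>
      let index : Int := (done.length : Int)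
      let token' := features.foldl
        (fun tok f =>
          let prevs := (PySem.List.pyRange 1 (L + 1) 1).map (fun d => pvGetTok done (index - d) f)
          let to_add := (PySem.List.pyRange 1 (L + 1) 1).foldl
            (fun ta k =>
              ta.insert ("prev_" ++ f ++ PySem.Int.toStr k)
                (PySem.Str.join " " ((PySem.List.slice prevs (some (-k)) none).map pvStr)))
            (PySem.Dict.mk [])
          ((PySem.Dict.mk tok).update to_add.items).items)
        token
      done ++ [token'])
    []

-- ===== PORT B =====
def addNGramFeatures_alt (tokens : List (List (String × String))) (features : List String) (ngram_len : Int) : List (List (String × String)) :=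
  let L := max 1 ngram_len
  let windows0 : PySem.Dict String (List String) :=
    features.foldl (fun d f => d.insert f (List.replicate L.toNat "None")) (PySem.Dict.mk [])
  (tokens.foldl
    (fun st token =>
      -- roll each window with the previous token's value (w.insert(0, str(prev[f])); w.pop())
      let windows : PySem.Dict String (List String) :=
        match st.2.1 with
        | none => st.1
        | some p => PySem.Dict.mk (st.1.items.map
            (fun fw => (fw.1, pvStr ((PySem.Dict.mk p).get? fw.1) :: fw.2.dropLast)))
      let token' := features.foldl
        (fun tok f =>
          let w := windows.getD f []
          -- index L - K is always in range: the window has length max(1, ngram_len)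
          let r := (PySem.List.pyRange 1 (L + 1) 1).foldl
            (fun (s : PySem.Dict String String × Option String) k =>
              let v := PySem.List.pyGetD w (L - k) ""
              let acc := match s.2 with | none => v | some a => v ++ " " ++ a
              (s.1.insert ("prev_" ++ f ++ PySem.Int.toStr k) acc, some acc))
            (PySem.Dict.mk [], none)
          ((PySem.Dict.mk tok).update r.1.items).items)
        token
      (windows, some token', st.2.2 ++ [token']))
    (windows0, none, ([] : List (List (String × String))))).2.2

-- ===== PRECONDITION & SPEC =====
-- Python A raises ValueError when a feature key is absent from a token that gets read (every
-- token but the last).  Pre_ requires each feature to be present in every non-last token; it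
-- is slightly narrower than "A returns": when a feature name coincides with an added
-- "prev_<feature><k>" key, A can return even though the key was not originally present.
def Pre_addNGramFeatures (tokens : List (List (String × String))) (features : List String) (ngram_len : Int) : Prop :=
  ∀ f ∈ features, ∀ t ∈ tokens.dropLast, ((PySem.Dict.mk t).get? f).isSome = true

instance (tokens : List (List (String × String))) (features : List String) (ngram_len : Int) : Decidable (Pre_addNGramFeatures tokens features ngram_len) := by unfold Pre_addNGramFeatures; infer_instance

def pvWitness_addNGramFeatures : (List (List (String × String))) × List String × Int :=
  ([[("a", "x")], [("a", "y")]], ["a"], 2)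

def Spec_addNGramFeatures (tokens : List (List (String × String))) (features : List String) (ngram_len : Int) (out : List (List (String × String))) : Prop := out = addNGramFeatures_alt tokens features ngram_len
instance (tokens : List (List (String × String))) (features : List String) (ngram_len : Int) (out : List (List (String × String))) : Decidable (Spec_addNGramFeatures tokens features ngram_len out) := by unfold Spec_addNGramFeatures; infer_instance

-- ===== CLAIM (what is proved, stated in full; the proofs are below) =====
def Claim_equal_addNGramFeatures : Prop := ∀ (tokens : List (List (String × String))) (features : List String) (ngram_len : Int), Dom_addNGramFeatures tokens features ngram_len → Pre_addNGramFeatures tokens features ngram_len → Spec_addNGramFeatures tokens features ngram_len (addNGramFeatures tokens features ngram_len)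

-- ===== LEMMAS AND PROOFS =====

-- the list of previous values (most recent first) that A recomputes at position done.length,
-- and its stringified form (the rolling window B maintains)
def pvPrevs (done : List (List (String × String))) (f : String) (L : Int) : List (Option String) :=
  (PySem.List.pyRange 1 (L + 1) 1).map (fun d => pvGetTok done ((done.length : Int) - d) f)

def pvWinOf (done : List (List (String × String))) (f : String) (L : Int) : List String :=
  (pvPrevs done f L).map pvStr

-- the two per-token loop bodies, definitionally equal to the lambdas inside the ports
def pvStepA (features : List String) (L : Int)
    (done : List (List (String × String))) (token : List (String × String)) :
    List (List (String × String)) :=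
  let index : Int := (done.length : Int)
  let token' := features.foldl
    (fun tok f =>
      let prevs := (PySem.List.pyRange 1 (L + 1) 1).map (fun d => pvGetTok done (index - d) f)
      let to_add := (PySem.List.pyRange 1 (L + 1) 1).foldl
        (fun ta k =>
          ta.insert ("prev_" ++ f ++ PySem.Int.toStr k)
            (PySem.Str.join " " ((PySem.List.slice prevs (some (-k)) none).map pvStr)))
        (PySem.Dict.mk [])
      ((PySem.Dict.mk tok).update to_add.items).items)
    token
  done ++ [token']

def pvStepB (features : List String) (L : Int)
    (st : PySem.Dict String (List String) × Option (List (String × String)) × List (List (String × String)))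
    (token : List (String × String)) :
    PySem.Dict String (List String) × Option (List (String × String)) × List (List (String × String)) :=
  let windows : PySem.Dict String (List String) :=
    match st.2.1 with
    | none => st.1
    | some p => PySem.Dict.mk (st.1.items.map
        (fun fw => (fw.1, pvStr ((PySem.Dict.mk p).get? fw.1) :: fw.2.dropLast)))
  let token' := features.foldl
    (fun tok f =>
      let w := windows.getD f []
      let r := (PySem.List.pyRange 1 (L + 1) 1).foldl
        (fun (s : PySem.Dict String String × Option String) k =>
          let v := PySem.List.pyGetD w (L - k) ""
          let acc := match s.2 with | none => v | some a => v ++ " " ++ a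
          (s.1.insert ("prev_" ++ f ++ PySem.Int.toStr k) acc, some acc))
        (PySem.Dict.mk [], none)
      ((PySem.Dict.mk tok).update r.1.items).items)
    token
  (windows, some token', st.2.2 ++ [token'])

theorem pvPortA_eq (tokens : List (List (String × String))) (features : List String) (n : Int) :
    addNGramFeatures tokens features n = tokens.foldl (pvStepA features (max 1 n)) [] := rfl

theorem pvPortB_eq (tokens : List (List (String × String))) (features : List String) (n : Int) :
    addNGramFeatures_alt tokens features n
      = (tokens.foldl (pvStepB features (max 1 n))
          (features.foldl (fun d f => d.insert f (List.replicate (max 1 n).toNat "None")) (PySem.Dict.mk []),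
           none, [])).2.2 := rfl

theorem pvLength_pvPrevs (done : List (List (String × String))) (f : String) (L : Int) :
    (pvPrevs done f L).length = L.toNat := by
  unfold pvPrevs
  rw [List.length_map, PySem.List.length_pyRange_one]
  congr 1
  ring

theorem pvLength_pvWinOf (done : List (List (String × String))) (f : String) (L : Int) :
    (pvWinOf done f L).length = L.toNat := by
  unfold pvWinOf; rw [List.length_map, pvLength_pvPrevs]

theorem pvWinOf_eq_range (done : List (List (String × String))) (f : String) (L : Int) :
    pvWinOf done f L
      = (List.range L.toNat).map
          (fun (j : Nat) => pvStr (pvGetTok done ((done.length : Int) - 1 - (j : Int)) f)) := by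
  unfold pvWinOf pvPrevs
  rw [PySem.List.pyRange_one, List.map_map, List.map_map]
  have h1 : (L + 1 - 1) = L := by ring
  rw [h1]
  apply List.map_congr_left
  intro k _
  simp only [Function.comp_apply]
  congr 2
  ring

theorem pvWinOf_nil (f : String) (L : Int) :
    pvWinOf [] f L = List.replicate L.toNat "None" := by
  rw [pvWinOf_eq_range, List.eq_replicate_iff]
  constructor
  · simp
  · intro b hb
    rw [List.mem_map] at hb
    obtain ⟨j, _, rfl⟩ := hb
    have : pvGetTok [] (((List.length ([] : List (List (String × String)))) : Int) - 1 - (j : Int)) f = none := by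
      unfold pvGetTok
      rw [if_pos]
      simp only [List.length_nil]
      omega
    rw [this]; rfl

theorem pvGetTok_dropLast (done : List (List (String × String))) (i : Int) (f : String)
    (h : i < (done.length : Int) - 1) :
    pvGetTok done.dropLast i f = pvGetTok done i f := by
  unfold pvGetTok
  by_cases h0 : i < 0
  · rw [if_pos (Or.inl h0), if_pos (Or.inl h0)]
  · have hlen : (done.dropLast.length : Int) = (done.length : Int) - 1 := by
      rw [List.length_dropLast]
      omega
    rw [if_neg (by omega), if_neg (by omega)]
    have hi : 0 ≤ i := by omega
    rw [PySem.List.pyGet?_of_nonneg done hi, PySem.List.pyGet?_of_nonneg done.dropLast hi]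
    rw [List.getElem?_dropLast, if_pos (by omega)]

theorem pvWinOf_roll (done : List (List (String × String))) (p : List (String × String))
    (f : String) (L : Int) (hL : 1 ≤ L) :
    pvWinOf (done ++ [p]) f L
      = pvStr ((PySem.Dict.mk p).get? f) :: (pvWinOf done f L).dropLast := by
  rw [pvWinOf_eq_range, pvWinOf_eq_range]
  obtain ⟨M, hM⟩ : ∃ M : Nat, L.toNat = M + 1 := ⟨L.toNat - 1, by omega⟩
  rw [hM]
  have hR : ((List.range (M + 1)).map
      (fun (j : Nat) => pvStr (pvGetTok done ((done.length : Int) - 1 - (j : Int)) f))).dropLast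
      = (List.range M).map
          (fun (j : Nat) => pvStr (pvGetTok done ((done.length : Int) - 1 - (j : Int)) f)) := by
    rw [List.range_succ, List.map_append, List.map_singleton, List.dropLast_concat]
  rw [hR, List.range_succ_eq_map, List.map_cons]
  congr 1
  · have hlen : (((done ++ [p]).length : Int)) - 1 - ((0 : Nat) : Int) = (done.length : Int) := by
      simp
    rw [hlen]
    unfold pvGetTok
    rw [if_neg]
    · rw [PySem.List.pyGet?_append_length]
    · simp
  · rw [List.map_map]
    apply List.map_congr_left
    intro j hj
    simp only [Function.comp_apply]
    have hidx : (((done ++ [p]).length : Int)) - 1 - ((Nat.succ j : Nat) : Int)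
        = (done.length : Int) - 1 - (j : Int) := by
      simp only [List.length_append, List.length_cons, List.length_nil]
      push_cast
      ring
    rw [hidx]
    have hdl : pvGetTok (done ++ [p]).dropLast ((done.length : Int) - 1 - (j : Int)) f
        = pvGetTok (done ++ [p]) ((done.length : Int) - 1 - (j : Int)) f := by
      apply pvGetTok_dropLast
      simp only [List.length_append, List.length_cons, List.length_nil]
      push_cast
      omega
    rw [List.dropLast_concat] at hdl
    rw [← hdl]

theorem str_join_singleton (s : String) : PySem.Str.join " " [s] = s := by
  simp [PySem.Str.join, PySem.Chars.join_singleton]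

theorem str_join_cons (a : String) (l : List String) (h : l ≠ []) :
    PySem.Str.join " " (a :: l) = a ++ " " ++ PySem.Str.join " " l := by
  obtain ⟨b, rest, rfl⟩ : ∃ b rest, l = b :: rest := by
    cases l with | nil => exact absurd rfl h | cons b rest => exact ⟨b, rest, rfl⟩
  simp [PySem.Str.join, PySem.Chars.join_cons_cons]
  rw [show (' ' :: PySem.Chars.join [' '] (b.toList :: rest.map String.toList))
        = [' '] ++ PySem.Chars.join [' '] (b.toList :: rest.map String.toList) from rfl]
  rw [String.ofList_append, show String.ofList [' '] = " " from rfl, ← String.append_assoc]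

theorem pvGet?_foldl_insert_const {ν : Type} (fs : List String) (d : PySem.Dict String ν) (c : ν) (x : String) :
    (fs.foldl (fun d f => d.insert f c) d).get? x = if x ∈ fs then some c else d.get? x := by
  induction fs generalizing d with
  | nil => simp
  | cons f fs ih =>
    rw [List.foldl_cons, ih, PySem.Dict.get?_insert]
    by_cases hx : x = f
    · subst hx; by_cases hm : x ∈ fs <;> simp [hm]
    · by_cases hm : x ∈ fs <;> simp [hm, hx]

theorem pvGet?_mk_map_keyed {ν μ : Type} (l : List (String × ν)) (g : String → ν → μ) (x : String) :
    (PySem.Dict.mk (l.map (fun (fw : String × ν) => (fw.1, g fw.1 fw.2)))).get? x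
      = ((PySem.Dict.mk l).get? x).map (g x) := by
  induction l with
  | nil => rfl
  | cons fw l ih =>
    rw [List.map_cons, PySem.Dict.get?_mk_cons, PySem.Dict.get?_mk_cons]
    by_cases hx : fw.1 == x
    · rw [if_pos hx, if_pos hx]
      have : fw.1 = x := by exact eq_of_beq hx
      subst this
      rfl
    · rw [if_neg (by simpa using hx), if_neg (by simpa using hx), ih]

theorem pvDrop_ne_nil (w : List String) (n : Nat) (h : n < w.length) : w.drop n ≠ [] := by
  intro hnil
  have := congrArg List.length hnil
  rw [List.length_drop] at this
  simp at this
  omega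

theorem pvToAdd_aux (done : List (List (String × String))) (f : String) (L : Int) (hL : 1 ≤ L)
    (M : Nat) (hM : (M : Int) ≤ L) :
    ((PySem.List.pyRange 1 ((M : Int) + 1) 1).foldl
        (fun (s : PySem.Dict String String × Option String) k =>
          (s.1.insert ("prev_" ++ f ++ PySem.Int.toStr k)
            (match s.2 with
              | none => PySem.List.pyGetD (pvWinOf done f L) (L - k) ""
              | some a => PySem.List.pyGetD (pvWinOf done f L) (L - k) "" ++ " " ++ a),
           some (match s.2 with
              | none => PySem.List.pyGetD (pvWinOf done f L) (L - k) ""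
              | some a => PySem.List.pyGetD (pvWinOf done f L) (L - k) "" ++ " " ++ a)))
        (PySem.Dict.mk [], none))
      = ((PySem.List.pyRange 1 ((M : Int) + 1) 1).foldl
          (fun ta k =>
            ta.insert ("prev_" ++ f ++ PySem.Int.toStr k)
              (PySem.Str.join " " ((PySem.List.slice (pvPrevs done f L) (some (-k)) none).map pvStr)))
          (PySem.Dict.mk []),
         if M = 0 then none
         else some (PySem.Str.join " " ((pvWinOf done f L).drop (L.toNat - M)))) := by
  induction M with
  | zero =>
    rw [show (((0 : Nat) : Int) + 1) = 1 by norm_num]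
    rw [PySem.List.pyRange_one_eq_nil (le_refl 1)]
    simp
  | succ M ih =>
    have hM' : (M : Int) ≤ L := by push_cast at hM ⊢; omega
    have hcast : ((M.succ : Nat) : Int) + 1 = ((M : Int) + 1) + 1 := by push_cast; ring
    rw [hcast, PySem.List.pyRange_one_succ_right (by omega : (1 : Int) ≤ (M : Int) + 1)]
    rw [List.foldl_append, List.foldl_append, ih hM']
    rw [List.foldl_cons, List.foldl_cons, List.foldl_nil, List.foldl_nil]
    -- arithmetic bookkeeping
    have hwlen : (pvWinOf done f L).length = L.toNat := pvLength_pvWinOf done f L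
    have hiNat : L.toNat - (M + 1) < (pvWinOf done f L).length := by omega
    -- the value read by B is the element the new n-gram starts with
    have hM2 : (M : Int) + 1 ≤ L := by push_cast at hM; omega
    have hv : PySem.List.pyGetD (pvWinOf done f L) (L - ((M : Int) + 1)) ""
        = (pvWinOf done f L)[L.toNat - (M + 1)] := by
      rw [show L - ((M : Int) + 1) = ((L.toNat - (M + 1) : Nat) : Int) by omega]
      rw [PySem.List.pyGetD_natCast, List.getD_eq_getElem _ _ hiNat]
    -- the dropped suffix decomposes as that element consed on the previous suffix
    have hdrop : (pvWinOf done f L).drop (L.toNat - (M + 1))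
        = (pvWinOf done f L)[L.toNat - (M + 1)] :: (pvWinOf done f L).drop (L.toNat - M) := by
      rw [show L.toNat - M = (L.toNat - (M + 1)) + 1 by omega]
      exact List.drop_eq_getElem_cons hiNat
    -- A's joined slice is exactly that suffix joined
    have hslice : (PySem.List.slice (pvPrevs done f L) (some (-((M : Int) + 1))) none).map pvStr
        = (pvWinOf done f L).drop (L.toNat - (M + 1)) := by
      rw [show -((M : Int) + 1) = -(((M + 1 : Nat)) : Int) by push_cast; ring]
      rw [PySem.List.slice_from_neg_natCast _ _ (Nat.succ_pos M), pvLength_pvPrevs,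
        List.map_drop]
      rfl
    -- the incremental join equals the joined suffix
    have hacc : (match (if M = 0 then none
          else some (PySem.Str.join " " ((pvWinOf done f L).drop (L.toNat - M)))) with
          | none => (pvWinOf done f L)[L.toNat - (M + 1)]
          | some a => (pvWinOf done f L)[L.toNat - (M + 1)] ++ " " ++ a)
        = PySem.Str.join " " ((pvWinOf done f L).drop (L.toNat - (M + 1))) := by
      by_cases hM0 : M = 0
      · subst hM0
        rw [if_pos rfl]
        rw [hdrop, show L.toNat - 0 = (pvWinOf done f L).length by omega, List.drop_length,
          str_join_singleton]
      · rw [if_neg hM0]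
        rw [hdrop, str_join_cons _ _ (pvDrop_ne_nil _ _ (by omega))]
    dsimp only
    rw [hv, hslice, hacc]
    simp

theorem pvRollInv (features : List String) (L : Int) (hL : 1 ≤ L)
    (done : List (List (String × String))) (V : PySem.Dict String (List String))
    (p : List (String × String))
    (hW : ∀ f ∈ features, V.get? f = some (pvWinOf done f L)) :
    ∀ f ∈ features,
      (PySem.Dict.mk (V.items.map
        (fun (fw : String × List String) =>
          (fw.1, pvStr ((PySem.Dict.mk p).get? fw.1) :: fw.2.dropLast)))).get? f
        = some (pvWinOf (done ++ [p]) f L) := by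
  intro f hf
  rw [pvGet?_mk_map_keyed V.items
      (fun (x : String) (v : List String) => pvStr ((PySem.Dict.mk p).get? x) :: v.dropLast) f,
    hW f hf, Option.map_some, pvWinOf_roll _ _ _ _ hL]

theorem pvMain (features : List String) (L : Int) (hL : 1 ≤ L) :
    ∀ (toks done : List (List (String × String)))
      (W : PySem.Dict String (List String)) (pOpt : Option (List (String × String))),
      (∀ f ∈ features,
        (match pOpt with
          | none => W
          | some p => PySem.Dict.mk (W.items.map
              (fun (fw : String × List String) => (fw.1, pvStr ((PySem.Dict.mk p).get? fw.1) :: fw.2.dropLast)))).get? f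
          = some (pvWinOf done f L)) →
      toks.foldl (pvStepA features L) done = (toks.foldl (pvStepB features L) (W, pOpt, done)).2.2 := by
  intro toks
  induction toks with
  | nil => intro done W pOpt hW; rfl
  | cons token toks ih =>
    intro done W pOpt hW
    rw [List.foldl_cons, List.foldl_cons]
    dsimp only [pvStepA, pvStepB]
    generalize hVeq : (match pOpt with
        | none => W
        | some p => PySem.Dict.mk (W.items.map
            (fun (fw : String × List String) => (fw.1, pvStr ((PySem.Dict.mk p).get? fw.1) :: fw.2.dropLast))))
      = V at hW ⊢
    have htok :
        features.foldl
          (fun tok f =>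
            let prevs := (PySem.List.pyRange 1 (L + 1) 1).map
              (fun d => pvGetTok done ((done.length : Int) - d) f)
            let to_add := (PySem.List.pyRange 1 (L + 1) 1).foldl
              (fun ta k =>
                ta.insert ("prev_" ++ f ++ PySem.Int.toStr k)
                  (PySem.Str.join " " ((PySem.List.slice prevs (some (-k)) none).map pvStr)))
              (PySem.Dict.mk [])
            ((PySem.Dict.mk tok).update to_add.items).items)
          token
        = features.foldl
            (fun tok f =>
              let w := V.getD f []
              let r := (PySem.List.pyRange 1 (L + 1) 1).foldl
                (fun (s : PySem.Dict String String × Option String) k =>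
                  let v := PySem.List.pyGetD w (L - k) ""
                  let acc := match s.2 with | none => v | some a => v ++ " " ++ a
                  (s.1.insert ("prev_" ++ f ++ PySem.Int.toStr k) acc, some acc))
                (PySem.Dict.mk [], none)
              ((PySem.Dict.mk tok).update r.1.items).items)
            token := by
      apply List.foldl_ext
      intro tok f hf
      dsimp only
      rw [PySem.Dict.getD_eq_get?_getD, hW f hf]
      simp only [Option.getD_some]
      have haux := pvToAdd_aux done f L hL L.toNat (by omega)
      rw [show ((L.toNat : Nat) : Int) = L by omega] at haux
      rw [haux]
      rfl
    rw [htok]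
    exact ih _ V _ (pvRollInv features L hL done V _ hW)

-- ===== VERDICT (by name: the statement is the Claim_ definition above) =====
theorem addNGramFeatures_spec : Claim_equal_addNGramFeatures := by
  intro tokens features ngram_len hdom hpre
  unfold Spec_addNGramFeatures
  rw [pvPortA_eq, pvPortB_eq]
  have hL : 1 ≤ max 1 ngram_len := le_max_left _ _
  apply pvMain features (max 1 ngram_len) hL tokens [] _ none
  intro f hf
  simp only
  rw [pvGet?_foldl_insert_const, if_pos hf, pvWinOf_nil]
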